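-- pv_equiv track=rewrite | github.com/xg-gh-25/SwarmAI | backend/skills/s_steeringify/steeringify.py | _text_contains_rule
-- ===== SOURCE A (Python) =====
-- def _text_contains_rule(haystack: str, rule_lower: str) -> bool:
--     """Check if a rule's key phrases already appear in a text body."""
--     if not haystack:
--         return False
--     haystack_lower = haystack.lower()
--     # Extract key phrases (5+ word sequences) from the rule
--     words = rule_lower.split()
--     for i in range(len(words) - 4):
--         phrase = " ".join(words[i:i + 5])
--         if phrase in haystack_lower:
--             return True
--     return False
-- ===== SOURCE B (Python) =====
-- def _text_contains_rule(haystack: str, rule_lower: str) -> bool: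
--     """Check if a rule's key phrases already appear in a text body."""
--     if not haystack:
--         return False
--     return _any_phrase(rule_lower.split(), haystack.lower())
--
--
-- def _any_phrase(words, hay):
--     # Recurse on the word list: test the leading 5-word phrase, then drop a word.
--     if len(words) < 5:
--         return False
--     return " ".join(words[:5]) in hay or _any_phrase(words[1:], hay)
-- ===== Notes on version B (the rewrite author's own statement) =====
-- stated objective: alternative
-- what changed: Replaces A's index loop over range(len(words)-4) with explicit slicing words[i:i+5] by a structural recursion on the word list that tests the leading 5-word phrase and recurses on the tail.
import Mathlib
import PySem

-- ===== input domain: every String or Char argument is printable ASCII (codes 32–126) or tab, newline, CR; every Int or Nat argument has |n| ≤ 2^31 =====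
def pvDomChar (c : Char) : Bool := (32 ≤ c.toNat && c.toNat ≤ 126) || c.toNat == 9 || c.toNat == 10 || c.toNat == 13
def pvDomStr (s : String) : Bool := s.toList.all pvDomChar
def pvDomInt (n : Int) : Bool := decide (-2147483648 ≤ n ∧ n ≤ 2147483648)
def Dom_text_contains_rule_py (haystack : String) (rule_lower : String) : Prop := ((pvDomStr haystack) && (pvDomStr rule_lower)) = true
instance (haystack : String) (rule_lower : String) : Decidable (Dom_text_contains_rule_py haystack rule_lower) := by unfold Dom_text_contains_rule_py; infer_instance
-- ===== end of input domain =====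

-- B replaces A's index loop over range(len(words)-4) with a structural recursion on the
-- word list (test the leading 5-word phrase, recurse on the tail): an alternative
-- decomposition of the same search, same cost.

-- ===== PORT A =====
-- for i in range(len(words)-4): phrase = " ".join(words[i:i+5]); if phrase in haystack_lower: return True
def text_contains_rule_py (haystack : String) (rule_lower : String) : Bool :=
  if PySem.Str.len haystack = 0 then false
  else
    let haystack_lower := PySem.Str.lower haystack
    let words := PySem.Str.split₀ rule_lower
    (PySem.List.pyRange 0 ((words.length : Int) - 4) 1).foldl
      (fun acc i =>
        acc || PySem.Str.isIn (PySem.Str.join " " (PySem.List.slice words (some i) (some (i + 5)))) haystack_lower)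
      false

-- ===== PORT B =====
-- _any_phrase: if len(words) < 5: False; else " ".join(words[:5]) in hay or _any_phrase(words[1:], hay)
def pvAnyPhrase : List String → String → Bool
  | [], _ => false
  | w :: rest, hay =>
    if (w :: rest).length < 5 then false
    else PySem.Str.isIn (PySem.Str.join " " (PySem.List.slice (w :: rest) none (some 5))) hay
         || pvAnyPhrase rest hay

def text_contains_rule_py_alt (haystack : String) (rule_lower : String) : Bool :=
  if PySem.Str.len haystack = 0 then false
  else pvAnyPhrase (PySem.Str.split₀ rule_lower) (PySem.Str.lower haystack)

-- ===== PRECONDITION & SPEC =====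
def Spec_text_contains_rule_py (haystack : String) (rule_lower : String) (out : Bool) : Prop := out = text_contains_rule_py_alt haystack rule_lower
instance (haystack : String) (rule_lower : String) (out : Bool) : Decidable (Spec_text_contains_rule_py haystack rule_lower out) := by unfold Spec_text_contains_rule_py; infer_instance

-- ===== CLAIM (what is proved, stated in full; the proofs are below) =====
def Claim_equal_text_contains_rule_py : Prop := ∀ (haystack : String) (rule_lower : String), Dom_text_contains_rule_py haystack rule_lower → Spec_text_contains_rule_py haystack rule_lower (text_contains_rule_py haystack rule_lower)

-- ===== LEMMAS AND PROOFS =====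

-- range(0, n) for a natural n, as a mapped List.range
theorem pv_range_cast (n : Nat) :
    PySem.List.pyRange 0 (n : Int) 1 = List.map (fun k : Nat => (k : Int)) (List.range n) := by
  rw [PySem.List.pyRange_one]
  simp

-- an || fold is the accumulator or-ed with List.any
theorem pv_foldl_or {α : Type} (l : List α) (f : α → Bool) (a : Bool) :
    l.foldl (fun acc i => acc || f i) a = (a || l.any f) := by
  induction l generalizing a with
  | nil => simp
  | cons x t ih => simp [List.foldl_cons, ih, Bool.or_assoc]

-- the Nat-indexed any over `words` equals the structural recursion of B
set_option maxHeartbeats 1000000 in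
theorem pv_main (words : List String) (hay : String) :
    (List.range (words.length - 4)).any
      (fun k => PySem.Str.isIn (PySem.Str.join " " (PySem.List.slice words (some (k : Int)) (some ((k : Int) + 5)))) hay)
    = pvAnyPhrase words hay := by
  induction words with
  | nil => simp [pvAnyPhrase]
  | cons w rest ih =>
    by_cases h : (w :: rest).length < 5
    · have h0 : (w :: rest).length - 4 = 0 := by omega
      rw [h0, pvAnyPhrase, if_pos h]
      simp
    · have hms : (w :: rest).length - 4 = (rest.length - 4) + 1 := by
        simp only [List.length_cons] at h ⊢; omega
      rw [hms, List.range_succ_eq_map, pvAnyPhrase, if_neg h]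
      simp only [List.any_cons, List.any_map, Nat.cast_zero]
      -- head phrase: words[0:5] = words[:5]
      have hs : PySem.List.slice (w :: rest) (some (0:Int)) (some ((0:Int) + 5))
          = PySem.List.slice (w :: rest) none (some 5) := by
        rw [PySem.List.slice_zero_start]; norm_num
      rw [hs]
      refine congrArg₂ (fun x y => x || y) rfl ?_
      · -- shifted indices: (w :: rest)[k+1 : k+6] = rest[k : k+5]
        rw [← ih]
        refine List.any_congr rfl fun k => ?_
        simp only [Function.comp_apply]
        congr 2
        have e2 : ((k + 1 : Nat) : Int) + 5 = ((k + 1 : Nat) : Int) + ((5 : Nat) : Int) := by push_cast; ring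
        have e3 : ((k : Nat) : Int) + 5 = ((k : Nat) : Int) + ((5 : Nat) : Int) := by push_cast; ring
        rw [e2, e3, PySem.List.slice_natCast_add (w :: rest) (k + 1) 5,
          PySem.List.slice_natCast_add rest k 5]
        simp [List.drop_succ_cons]

-- ===== VERDICT (by name: the statement is the Claim_ definition above) =====
theorem text_contains_rule_py_spec : Claim_equal_text_contains_rule_py := by
  intro haystack rule_lower _
  unfold Spec_text_contains_rule_py text_contains_rule_py text_contains_rule_py_alt
  by_cases h : PySem.Str.len haystack = 0
  · rw [if_pos h, if_pos h]
  · rw [if_neg h, if_neg h, pv_foldl_or, Bool.false_or]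
    have hn : ((PySem.Str.split₀ rule_lower).length : Int) - 4
        = (((PySem.Str.split₀ rule_lower).length - 4 : Nat) : Int) ∨
        ((PySem.Str.split₀ rule_lower).length : Int) - 4 ≤ 0 := by omega
    rcases hn with hn | hn
    · rw [hn, pv_range_cast, List.any_map,
        ← pv_main (PySem.Str.split₀ rule_lower) (PySem.Str.lower haystack)]
      exact List.any_congr rfl fun k => rfl
    · rw [PySem.List.pyRange_one_eq_nil hn, ← pv_main]
      have h0 : (PySem.Str.split₀ rule_lower).length - 4 = 0 := by omega
      rw [h0]
      simp
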